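-- pv_equiv track=rewrite | github.com/GeorgMiller/Hypernetworks | DouDizhu/agents/non_rl/rhcp_agent.py | get_all_comb
-- ===== SOURCE A (Python) =====
-- import copy
-- from collections import Counter
--
-- def mapping(cards):
--     # map card string to value of cards, used for calculating MaxCard value
--     if len(cards) > 1:
--         cards = cards[0]
--     if '2' < cards <= '9':
--         return int(cards)
--     elif cards == 'T':
--         return 10
--     elif cards == 'J':
--         return 11
--     elif cards == 'Q':
--         return 12
--     elif cards == 'K':
--         return 13
--     elif cards == 'A':
--         return 14
--     elif cards == '2':
--         return 15
--     elif cards == 'B':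
--         return 16
--     elif cards == 'R':
--         return 17
--     else:
--         return 17
--
-- def remove_card(hand_cards, played_cards):
--     # remove card being played from hand
--     for i in played_cards:
--         if i != 'pass':
--             hand_cards = hand_cards.replace(i, '', 1)
--     return hand_cards
--
-- def partition(legal_cards, cards, idx, possible_list, all_possible_list, level):
--     length = len(legal_cards)
--     if idx >= length:
--         return
--     if len(cards) == 0:
--         all_possible_list.append(possible_list)
--         return
--     for i in range(idx, length):
--         cur_card_cnt = Counter(cards)
--         legal_cards_cnt = Counter(legal_cards[i])
--         is_greater = True
--         for key, value in legal_cards_cnt.items():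
--             if cur_card_cnt[key] < value:
--                 is_greater = False
--                 break
--         if is_greater is True:
--             tmp_card = remove_card(cards, legal_cards[i])
--             tmp_possible_list = copy.deepcopy(possible_list)
--             tmp_possible_list.append(legal_cards[i])
--             partition(legal_cards, tmp_card, i, tmp_possible_list, all_possible_list, level+1)
--
-- def get_all_comb(legal_cards, cards):
--     comb = []
--     level = 0
--     partition(legal_cards, cards, 0, [], comb, level)
--     comb = sorted(comb, key=lambda i: (len(i), mapping(i[0])))
--     result = []
--     for cb in comb:
--         if cb not in result:
--             result.append(cb)
--     return result
-- ===== SOURCE B (Python) =====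
-- def mapping(cards):
--     # map card string to value of cards, used for calculating MaxCard value
--     if len(cards) > 1:
--         cards = cards[0]
--     if '2' < cards <= '9':
--         return int(cards)
--     elif cards == 'T':
--         return 10
--     elif cards == 'J':
--         return 11
--     elif cards == 'Q':
--         return 12
--     elif cards == 'K':
--         return 13
--     elif cards == 'A':
--         return 14
--     elif cards == '2':
--         return 15
--     elif cards == 'B':
--         return 16
--     elif cards == 'R':
--         return 17
--     else:
--         return 17
--
--
-- def get_all_comb(legal_cards, cards):
--     # Pure take/skip recursion instead of the loop-with-mutation DFS, and a
--     # seen-set dedup instead of the quadratic 'not in result' scan.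
--     n = len(legal_cards)
--
--     def gen(i, cs, pl):
--         if i >= n:
--             return []
--         if not cs:
--             return [pl]
--         card = legal_cards[i]
--         take = []
--         if all(cs.count(ch) >= card.count(ch) for ch in card):
--             rest = cs
--             for ch in card:
--                 rest = rest.replace(ch, '', 1)
--             take = gen(i, rest, pl + [card])
--         return take + gen(i + 1, cs, pl)
--
--     comb = sorted(gen(0, cards, []), key=lambda c: (len(c), mapping(c[0])))
--     seen = set()
--     result = []
--     for cb in comb:
--         t = tuple(cb)
--         if t not in seen:
--             seen.add(t)
--             result.append(cb)
--     return result
-- ===== Notes on version B (the rewrite author's own statement) =====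
-- stated objective: alternative
-- what changed: The loop-over-indices DFS with an output-list mutation, per-candidate Counter objects and deepcopy of the partial list is replaced by a pure take/skip binary recursion that returns its result lists, checks feasibility with str.count, and the quadratic 'cb not in result' dedup scan is replaced by a seen-set.
import Mathlib
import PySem

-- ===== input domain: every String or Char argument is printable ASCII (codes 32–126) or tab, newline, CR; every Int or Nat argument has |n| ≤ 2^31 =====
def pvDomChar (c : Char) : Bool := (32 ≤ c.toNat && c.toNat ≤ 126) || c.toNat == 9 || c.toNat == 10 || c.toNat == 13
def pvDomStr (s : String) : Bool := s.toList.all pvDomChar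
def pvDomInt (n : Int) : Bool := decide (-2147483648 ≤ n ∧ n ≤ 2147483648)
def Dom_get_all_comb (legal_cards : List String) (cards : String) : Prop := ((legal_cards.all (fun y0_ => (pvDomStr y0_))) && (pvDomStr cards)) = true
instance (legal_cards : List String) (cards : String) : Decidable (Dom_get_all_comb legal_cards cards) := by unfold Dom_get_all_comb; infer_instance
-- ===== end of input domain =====

-- B replaces A's index-loop DFS with mutation/deepcopy by a pure take/skip recursion and the
-- quadratic 'not in result' dedup by a seen-set; equal output proved on Pre_ (alternative, not faster).

-- ===== PORT A =====
-- mapping: Python string comparison is code-point lexicographic = Lean's lex order on List Char (exact)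
def pvMapping (cards : List Char) : Int :=
  let cs := if 1 < cards.length then cards.take 1 else cards   -- cards = cards[0]
  if ['2'] < cs ∧ cs ≤ ['9'] then (PySem.Int.ofChars? cs).getD 0   -- int(cards); in this branch cs is a single digit '3'..'9', so ofChars? is some (default unreachable)
  else if cs = ['T'] then 10
  else if cs = ['J'] then 11
  else if cs = ['Q'] then 12
  else if cs = ['K'] then 13
  else if cs = ['A'] then 14
  else if cs = ['2'] then 15
  else if cs = ['B'] then 16
  else if cs = ['R'] then 17
  else 17

-- remove_card: hand.replace(i, '', 1) with a ONE-CHAR pattern removes the first occurrence of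
-- that char, which is exactly List.erase (exact on chars; the i != 'pass' test is always true for chars)
def pvRemoveCard (hand_cards : List Char) (played_cards : List Char) : List Char :=
  played_cards.foldl (fun h ch => h.erase ch) hand_cards

-- partition: returns the list of combinations appended to all_possible_list, in DFS order.
-- fuel only makes the recursion total; it is never exhausted on inputs satisfying Pre_ (the
-- Python recurses forever exactly where it would be, i.e. on empty strings in legal_cards).
def pvPartition (legal_cards : List String) (cards : List Char) (idx : Int)
    (possible_list : List String) (fuel : Nat) : List (List String) :=
  match fuel with
  | 0 => []
  | fuel + 1 =>
    let length : Int := legal_cards.length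
    if length ≤ idx then []
    else if cards.length = 0 then [possible_list]
    else
      (PySem.List.pyRange idx length 1).foldl (fun acc i =>
        let curCardCnt := PySem.Dict.counter cards
        let legalI := PySem.List.pyGetD legal_cards i ""
        let legalCardsCnt := PySem.Dict.counter legalI.toList
        let isGreater := legalCardsCnt.items.all
          (fun kv => !decide (PySem.Dict.getD curCardCnt kv.1 0 < kv.2))
        if isGreater then
          acc ++ pvPartition legal_cards (pvRemoveCard cards legalI.toList) i
                  (possible_list ++ [legalI]) fuel
        else acc) []

def get_all_comb (legal_cards : List String) (cards : String) : List (List String) :=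
  let comb := pvPartition legal_cards cards.toList 0 [] (cards.toList.length + 1)
  -- sort key (len(i), mapping(i[0])); i[0] raises IndexError on the empty combination — excluded by Pre_
  let comb := PySem.List.sorted2 comb (fun i => (i.length : Int))
                (fun i => pvMapping (PySem.List.pyGetD i 0 "").toList)
  comb.foldl (fun result cb => if cb ∈ result then result else result ++ [cb]) []

-- ===== PORT B =====
-- rest = rest.replace(ch, '', 1) over the chars of card (one-char pattern = erase, exact)
def pvRemoveAlt (cs : List Char) (card : List Char) : List Char :=
  card.foldl (fun rest ch => rest.erase ch) cs

-- gen: pure take/skip recursion; fuel for totality only (B's Python recurses forever exactly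
-- where fuel would run out, i.e. on empty strings in legal_cards)
def pvGen (legal_cards : List String) (n : Nat) (i : Nat) (cs : List Char)
    (pl : List String) (fuel : Nat) : List (List String) :=
  match fuel with
  | 0 => []
  | fuel + 1 =>
    if n ≤ i then []
    else if cs = [] then [pl]
    else
      let card := (legal_cards.getD i "").toList
      let take :=
        if card.all (fun ch => card.count ch ≤ cs.count ch) then
          pvGen legal_cards n i (pvRemoveAlt cs card) (pl ++ [legal_cards.getD i ""]) fuel
        else []
      take ++ pvGen legal_cards n (i + 1) cs pl fuel

def get_all_comb_alt (legal_cards : List String) (cards : String) : List (List String) :=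
  let comb := pvGen legal_cards legal_cards.length 0 cards.toList []
                (cards.toList.length + legal_cards.length + 1)
  let comb := PySem.List.sorted2 comb (fun i => (i.length : Int))
                (fun i => pvMapping (PySem.List.pyGetD i 0 "").toList)
  (comb.foldl (fun (st : PySem.Set (List String) × List (List String)) cb =>
      if PySem.Set.contains st.1 cb then st
      else (PySem.Set.add st.1 cb, st.2 ++ [cb])) (PySem.Set.empty, [])).2

-- ===== PRECONDITION & SPEC =====
-- Pre_ excludes inputs where A does not return: an empty string in legal_cards makes partition
-- recurse forever (when cards is nonempty), and empty cards with nonempty legal_cards makes the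
-- sort key index cb[0] of the empty combination (IndexError).
def Pre_get_all_comb (legal_cards : List String) (cards : String) : Prop :=
  (∀ s ∈ legal_cards, s ≠ "") ∧ (cards ≠ "" ∨ legal_cards = [])
instance (legal_cards : List String) (cards : String) : Decidable (Pre_get_all_comb legal_cards cards) := by
  unfold Pre_get_all_comb; infer_instance

def pvWitness_get_all_comb : List String × String := (["33", "4"], "334")

def Spec_get_all_comb (legal_cards : List String) (cards : String) (out : List (List String)) : Prop :=
  out = get_all_comb_alt legal_cards cards
instance (legal_cards : List String) (cards : String) (out : List (List String)) :
    Decidable (Spec_get_all_comb legal_cards cards out) := by unfold Spec_get_all_comb; infer_instance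

-- ===== CLAIM (what is proved, stated in full; the proofs are below) =====
def Claim_equal_get_all_comb : Prop := ∀ (legal_cards : List String) (cards : String),
  Dom_get_all_comb legal_cards cards → Pre_get_all_comb legal_cards cards →
  Spec_get_all_comb legal_cards cards (get_all_comb legal_cards cards)

-- ===== LEMMAS AND PROOFS =====

-- A's Counter-items feasibility test equals B's per-char count test
lemma pvFeas_eq (cs card : List Char) :
    ((PySem.Dict.counter card).items.all
      (fun kv => !decide (PySem.Dict.getD (PySem.Dict.counter cs) kv.1 0 < kv.2)))
    = card.all (fun ch => card.count ch ≤ cs.count ch) := by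
  rw [PySem.Dict.items_counter]
  rw [Bool.eq_iff_iff]
  simp only [List.all_map, Function.comp, List.all_eq_true, PySem.Dict.getD_counter,
    Bool.not_eq_eq_eq_not, Bool.not_true, decide_eq_false_iff_not, not_lt, decide_eq_true_eq]
  constructor
  · intro h ch hch
    exact_mod_cast h ch ((PySem.Set.mem_ofList card ch).mpr hch)
  · intro h ch hch
    exact_mod_cast h ch ((PySem.Set.mem_ofList card ch).mp hch)

lemma pvRemove_le (card : List Char) : ∀ (cs : List Char),
    (card.foldl (fun h ch => h.erase ch) cs).length ≤ cs.length := by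
  induction card with
  | nil => intro cs; simp
  | cons c t ih =>
    intro cs
    calc (t.foldl (fun h ch => h.erase ch) (cs.erase c)).length
        ≤ (cs.erase c).length := ih _
      _ ≤ cs.length := List.length_erase_le

lemma pvRemove_lt (cs card : List Char)
    (h : card.all (fun ch => card.count ch ≤ cs.count ch) = true) (hne : card ≠ []) :
    (pvRemoveAlt cs card).length < cs.length := by
  obtain ⟨c, t, rfl⟩ := List.exists_cons_of_ne_nil hne
  have hc : c ∈ cs := by
    have := (List.all_eq_true.mp h) c (by simp)
    simp only [decide_eq_true_eq] at this
    have h1 : 0 < List.count c (c :: t) := by simp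
    exact List.count_pos_iff.mp (lt_of_lt_of_le h1 this)
  have hlen : (cs.erase c).length = cs.length - 1 := List.length_erase_of_mem hc
  have hpos : 0 < cs.length := List.length_pos_of_mem hc
  calc (pvRemoveAlt cs (c :: t)).length
      = (t.foldl (fun h ch => h.erase ch) (cs.erase c)).length := rfl
    _ ≤ (cs.erase c).length := pvRemove_le t _
    _ < cs.length := by omega

-- rewrite A's loop body into the flatMap shape
lemma pvFoldl_if_append {α β : Type} (p : α → Bool) (g : α → List β) (l : List α) (a : List β) :
    l.foldl (fun acc x => if p x then acc ++ g x else acc) a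
    = a ++ l.flatMap (fun x => if p x then g x else []) := by
  have hfun : (fun (acc : List β) x => if p x then acc ++ g x else acc)
      = (fun acc x => acc ++ if p x then g x else []) := by
    funext acc x; split <;> simp
  rw [hfun, PySem.List.foldl_append_eq_flatMap]

-- the A-side child of the DFS at index j, with child fuel fA
def pvChildA (legal_cards : List String) (cs : List Char) (pl : List String) (fA : Nat)
    (j : Int) : List (List String) :=
  let legalI := PySem.List.pyGetD legal_cards j ""
  if ((PySem.Dict.counter legalI.toList).items.all
        (fun kv => !decide (PySem.Dict.getD (PySem.Dict.counter cs) kv.1 0 < kv.2))) then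
    pvPartition legal_cards (pvRemoveCard cs legalI.toList) j (pl ++ [legalI]) fA
  else []

lemma pvPartition_unfold (legal : List String) (cs : List Char) (idx : Int)
    (pl : List String) (f : Nat) (hidx : idx < legal.length) (hcs : cs ≠ []) :
    pvPartition legal cs idx pl (f + 1)
    = (PySem.List.pyRange idx legal.length 1).flatMap (pvChildA legal cs pl f) := by
  rw [pvPartition]
  simp only [not_le.mpr hidx, List.length_eq_zero_iff, if_neg hcs]
  rw [pvFoldl_if_append
    (fun i => ((PySem.Dict.counter (PySem.List.pyGetD legal i "").toList).items.all
      (fun kv => !decide (PySem.Dict.getD (PySem.Dict.counter cs) kv.1 0 < kv.2))))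
    (fun i => pvPartition legal (pvRemoveCard cs (PySem.List.pyGetD legal i "").toList) i
      (pl ++ [PySem.List.pyGetD legal i ""]) f)]
  rfl

-- main loop/recursion correspondence, by strong induction on B's fuel
lemma pvLoop (legal : List String) (hg : ∀ s ∈ legal, s ≠ "") :
    ∀ fB (cs : List Char) (i : Nat) (pl : List String) (fA : Nat), cs ≠ [] →
    cs.length ≤ fA → cs.length + (legal.length - i) < fB →
    (PySem.List.pyRange (i : Int) (legal.length : Int) 1).flatMap (pvChildA legal cs pl fA)
    = pvGen legal legal.length i cs pl fB := by
  intro fB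
  induction fB using Nat.strong_induction_on with
  | _ fB ih =>
  intro cs i pl fA hne hfa hfb
  have hcs1 : 1 ≤ cs.length := List.length_pos_of_ne_nil hne
  obtain ⟨m, rfl⟩ : ∃ m, fB = m + 1 := ⟨fB - 1, by omega⟩
  by_cases hlen : legal.length ≤ i
  · rw [PySem.List.pyRange_one_eq_nil (by exact_mod_cast hlen)]
    simp only [List.flatMap_nil, pvGen, if_pos hlen]
  · rw [not_le] at hlen
    rw [PySem.List.pyRange_one_cons (by exact_mod_cast hlen), List.flatMap_cons]
    rw [pvGen]
    rw [if_neg (by omega), if_neg hne]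
    have htail := ih m (by omega) cs (i + 1) pl fA hne hfa (by omega)
    rw [show ((i : Int) + 1) = (((i + 1 : Nat) : Int)) by push_cast; ring, htail]
    congr 1
    -- head: A's child at index i equals B's take branch
    have hget : PySem.List.pyGetD legal (i : Int) "" = legal.getD i "" := by
      simp [PySem.List.pyGetD_natCast]
    simp only [pvChildA, hget, pvFeas_eq]
    set card := (legal.getD i "").toList with hcard
    by_cases hfeas : card.all (fun ch => card.count ch ≤ cs.count ch) = true
    · rw [if_pos hfeas, if_pos hfeas]
      have hmem : legal.getD i "" ∈ legal := by
        rw [List.getD_eq_getElem?_getD, List.getElem?_eq_getElem hlen]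
        exact List.getElem_mem hlen
      have hcardne : card ≠ [] := by
        rw [hcard, ne_eq, String.toList_eq_nil_iff]
        exact hg _ hmem
      have hlt : (pvRemoveAlt cs card).length < cs.length := pvRemove_lt cs card hfeas hcardne
      have hrm : pvRemoveCard cs card = pvRemoveAlt cs card := rfl
      obtain ⟨f, rfl⟩ : ∃ f, fA = f + 1 := ⟨fA - 1, by omega⟩
      by_cases hcs' : pvRemoveAlt cs card = []
      · rw [hrm, hcs']
        rw [pvPartition]
        rw [if_neg (by exact_mod_cast not_le.mpr hlen)]
        rw [if_pos (show (List.nil : List Char).length = 0 from rfl)]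
        obtain ⟨m', rfl⟩ : ∃ m', m = m' + 1 := ⟨m - 1, by omega⟩
        rw [pvGen]
        rw [if_neg (not_le.mpr hlen), if_pos (show (List.nil : List Char) = [] from rfl)]
      · rw [hrm, pvPartition_unfold legal _ _ _ f (by exact_mod_cast hlen) hcs']
        exact ih m (by omega) _ i _ f hcs' (by omega) (by omega)
    · rw [if_neg hfeas, if_neg hfeas]

-- totalized top form
lemma pvTop (legal : List String) (hg : ∀ s ∈ legal, s ≠ "") (cs : List Char) (i : Nat)
    (pl : List String) (fA fB : Nat) (h1 : cs.length < fA)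
    (h2 : cs.length + (legal.length - i) < fB) :
    pvPartition legal cs (i : Int) pl fA = pvGen legal legal.length i cs pl fB := by
  obtain ⟨f, rfl⟩ : ∃ f, fA = f + 1 := ⟨fA - 1, by omega⟩
  obtain ⟨m, rfl⟩ : ∃ m, fB = m + 1 := ⟨fB - 1, by omega⟩
  by_cases hlen : legal.length ≤ i
  · rw [pvPartition, pvGen]
    rw [if_pos (by exact_mod_cast hlen), if_pos hlen]
  · rw [not_le] at hlen
    by_cases hcs : cs = []
    · rw [pvPartition, pvGen]
      rw [if_neg (by exact_mod_cast not_le.mpr hlen), if_neg (not_le.mpr hlen),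
        if_pos (by simp [hcs]), if_pos hcs]
    · rw [pvPartition_unfold legal cs (i : Int) pl f (by exact_mod_cast hlen) hcs]
      exact pvLoop legal hg (m + 1) cs i pl f hcs (by omega) h2

-- Set.contains as a decide, for rewriting the seen-set test
lemma pvContains_eq {a : Type} [BEq a] [LawfulBEq a] (s : PySem.Set a) (x : a) :
    PySem.Set.contains s x = decide (x ∈ s) := by
  by_cases h : x ∈ s
  · rw [(PySem.Set.contains_iff s x).mpr h, decide_eq_true h]
  · rw [decide_eq_false h]
    exact Bool.eq_false_iff.mpr (fun hc => h ((PySem.Set.contains_iff s x).mp hc))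

-- the two dedup loops agree whenever 'seen' holds exactly the members of 'res'
lemma pvDedup (l : List (List String)) : ∀ (seen : PySem.Set (List String)) (res : List (List String)),
    (∀ x, x ∈ seen ↔ x ∈ res) →
    (l.foldl (fun st cb => if PySem.Set.contains st.1 cb then st
        else (PySem.Set.add st.1 cb, st.2 ++ [cb])) (seen, res)).2
    = l.foldl (fun result cb => if cb ∈ result then result else result ++ [cb]) res := by
  induction l with
  | nil => intro seen res _; rfl
  | cons cb t ih =>
    intro seen res hinv
    have hhead : PySem.Set.contains seen cb = decide (cb ∈ res) := by
      rw [pvContains_eq]; exact decide_eq_decide.mpr (hinv cb)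
    by_cases hm : cb ∈ res
    · simp only [List.foldl_cons, hhead, decide_eq_true hm, if_true, if_pos hm]
      exact ih seen res hinv
    · simp only [List.foldl_cons, hhead, decide_eq_false hm, Bool.false_eq_true, if_false, if_neg hm]
      apply ih
      intro x
      rw [PySem.Set.mem_add, List.mem_append, List.mem_singleton, hinv x]

-- ===== VERDICT (by name: the statement is the Claim_ definition above) =====
theorem get_all_comb_spec : Claim_equal_get_all_comb := by
  intro legal cards _ hpre
  obtain ⟨hg, hor⟩ := hpre
  unfold Spec_get_all_comb
  by_cases hnil : legal = []
  · subst hnil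
    rfl
  · have hcards : cards ≠ "" := by tauto
    have hcs : cards.toList ≠ [] := by rw [ne_eq, String.toList_eq_nil_iff]; exact hcards
    have key := pvTop legal hg cards.toList 0 [] (cards.toList.length + 1)
      (cards.toList.length + legal.length + 1) (by omega) (by omega)
    rw [show ((0 : Nat) : Int) = (0 : Int) by simp] at key
    unfold get_all_comb get_all_comb_alt
    rw [key]
    exact (pvDedup _ PySem.Set.empty [] (by intro x; simp [PySem.Set.empty])).symm
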